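-- pv_equiv track=rewrite | github.com/Kefka174/leetcode | solutions/partition-equal-subset-sum/solution.py | combineIntsToTarget
-- ===== SOURCE A (Python) =====
-- def combineIntsToTarget(target, nums):
--     if len(nums) == 1 and nums[0] == target: return []
--     if target < 0 or len(nums) <= 1: return None
--
--     usedFirstNum = combineIntsToTarget(target - nums[0], nums[1:])
--     if usedFirstNum != None: return usedFirstNum
--     else:
--         notUseFirstNum = combineIntsToTarget(target, nums[1:])
--         if notUseFirstNum != None: return [nums[0]] + notUseFirstNum
--
--     return None
-- ===== SOURCE B (Python) =====
-- def combineIntsToTarget(target, nums):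
--     # Memoized recursion on (remaining target, suffix index): same search,
--     # but each visited state is solved only once.
--     memo = {}
--     def go(t, i):
--         key = (t, i)
--         if key in memo:
--             return memo[key]
--         n = len(nums) - i
--         if n == 1 and nums[i] == t:
--             res = []
--         elif t < 0 or n <= 1:
--             res = None
--         else:
--             used = go(t - nums[i], i + 1)
--             if used is not None:
--                 res = used
--             else:
--                 rest = go(t, i + 1)
--                 res = [nums[i]] + rest if rest is not None else None
--         memo[key] = res
--         return res
--     return go(target, 0)
-- ===== Notes on version B (the rewrite author's own statement) =====
-- stated objective: alternative
-- what changed: Replaces A's plain branching recursion on list suffixes with a memoized recursion on (remaining target, suffix index), so each visited state is solved once; with arbitrary integers the number of distinct states can still grow, so no speed is claimed.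
import Mathlib
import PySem

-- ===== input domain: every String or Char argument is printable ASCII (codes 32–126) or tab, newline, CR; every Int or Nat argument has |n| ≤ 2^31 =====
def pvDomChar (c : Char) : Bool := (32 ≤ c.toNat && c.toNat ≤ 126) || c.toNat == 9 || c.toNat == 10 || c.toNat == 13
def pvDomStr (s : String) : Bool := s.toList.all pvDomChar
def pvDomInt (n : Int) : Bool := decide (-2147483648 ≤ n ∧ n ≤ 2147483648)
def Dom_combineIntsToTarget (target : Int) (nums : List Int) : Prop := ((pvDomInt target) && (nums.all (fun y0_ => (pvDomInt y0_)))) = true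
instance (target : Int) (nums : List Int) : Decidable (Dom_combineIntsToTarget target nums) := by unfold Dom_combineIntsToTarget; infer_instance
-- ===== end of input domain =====

-- B replaces A's plain branching recursion on list suffixes with a memoized
-- recursion on (remaining target, suffix index): each visited state is solved once.

-- ===== PORT A =====
-- nums[0] is only evaluated when len(nums) == 1 (short-circuit and) or len(nums) >= 2,
-- so it never raises; headI is exact there.  nums[1:] = tail in those branches.
def combineIntsToTarget (target : Int) (nums : List Int) : Option (List Int) :=
  if nums.length = 1 ∧ PySem.List.pyGet? nums 0 = some target then some []
  else if _h2 : target < 0 ∨ nums.length ≤ 1 then none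
  else
    match combineIntsToTarget (target - nums.headI) nums.tail with
    | some usedFirstNum => some usedFirstNum
    | none =>
      match combineIntsToTarget target nums.tail with
      | some notUseFirstNum => some (nums.headI :: notUseFirstNum)
      | none => none
termination_by nums.length
decreasing_by all_goals (simp [List.length_tail]; omega)

-- ===== PORT B =====
-- go(t, i) of Source B; the memo dict is threaded through as state.
def pvGoB (nums : List Int) (t : Int) (i : Nat)
    (memo : PySem.Dict (Int × Nat) (Option (List Int))) :
    Option (List Int) × PySem.Dict (Int × Nat) (Option (List Int)) :=
  match memo.get? (t, i) with
  | some v => (v, memo)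
  | none =>
    if (nums.length : Int) - (i : Int) = 1 ∧ PySem.List.pyGet? nums (i : Int) = some t then
      (some [], memo.insert (t, i) (some []))
    else if _h2 : t < 0 ∨ (nums.length : Int) - (i : Int) ≤ 1 then
      (none, memo.insert (t, i) none)
    else
      match pvGoB nums (t - nums.getD i 0) (i + 1) memo with
      | (some u, m1) => (some u, m1.insert (t, i) (some u))
      | (none, m1) =>
        match pvGoB nums t (i + 1) m1 with
        | (some r, m2) => (some (nums.getD i 0 :: r), m2.insert (t, i) (some (nums.getD i 0 :: r)))
        | (none, m2) => (none, m2.insert (t, i) none)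
termination_by nums.length - i
decreasing_by all_goals omega

def combineIntsToTarget_alt (target : Int) (nums : List Int) : Option (List Int) :=
  (pvGoB nums target 0 PySem.Dict.empty).1

-- ===== PRECONDITION & SPEC =====
def Spec_combineIntsToTarget (target : Int) (nums : List Int) (out : Option (List Int)) : Prop := out = combineIntsToTarget_alt target nums
instance (target : Int) (nums : List Int) (out : Option (List Int)) : Decidable (Spec_combineIntsToTarget target nums out) := by unfold Spec_combineIntsToTarget; infer_instance

-- ===== CLAIM (what is proved, stated in full; the proofs are below) =====
def Claim_equal_combineIntsToTarget : Prop := ∀ (target : Int) (nums : List Int), Dom_combineIntsToTarget target nums → Spec_combineIntsToTarget target nums (combineIntsToTarget target nums)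

-- ===== LEMMAS AND PROOFS =====

-- one-step unfolding of A, usable by rw
theorem pvA_eq (t : Int) (l : List Int) :
    combineIntsToTarget t l =
      if l.length = 1 ∧ PySem.List.pyGet? l 0 = some t then some []
      else if _h2 : t < 0 ∨ l.length ≤ 1 then none
      else
        match combineIntsToTarget (t - l.headI) l.tail with
        | some usedFirstNum => some usedFirstNum
        | none =>
          match combineIntsToTarget t l.tail with
          | some notUseFirstNum => some (l.headI :: notUseFirstNum)
          | none => none := by
  rw [combineIntsToTarget]

-- memo invariant: every stored value is the plain-recursion answer for its state
def pvGood (nums : List Int) (m : PySem.Dict (Int × Nat) (Option (List Int))) : Prop :=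
  ∀ t i v, m.get? (t, i) = some v → v = combineIntsToTarget t (nums.drop i)

theorem pvGood_insert {nums : List Int} {m : PySem.Dict (Int × Nat) (Option (List Int))}
    (hm : pvGood nums m) (t : Int) (i : Nat)
    (v : Option (List Int)) (hv : v = combineIntsToTarget t (nums.drop i)) :
    pvGood nums (m.insert (t, i) v) := by
  intro t' i' v' h
  rw [PySem.Dict.get?_insert] at h
  by_cases he : (t', i') = (t, i)
  · have h3 : t' = t := congrArg Prod.fst he
    have h4 : i' = i := congrArg Prod.snd he
    rw [if_pos he] at h
    injection h with h5
    subst h3; subst h4; subst h5; exact hv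
  · rw [if_neg he] at h
    exact hm t' i' v' h

theorem pvGet_drop (nums : List Int) (i : Nat) :
    PySem.List.pyGet? (nums.drop i) 0 = PySem.List.pyGet? nums (i : Int) := by
  simp [PySem.List.pyGet?_zero, PySem.List.pyGet?_natCast, List.getElem?_drop]

theorem pvGoB_correct (nums : List Int) (d : Nat) :
    ∀ (t : Int) (i : Nat) (m : PySem.Dict (Int × Nat) (Option (List Int))),
      nums.length - i ≤ d → pvGood nums m →
      (pvGoB nums t i m).1 = combineIntsToTarget t (nums.drop i) ∧
      pvGood nums (pvGoB nums t i m).2 := by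
  induction d with
  | zero =>
    intro t i m hd hm
    rw [pvGoB]
    cases hget : m.get? (t, i) with
    | some v => exact ⟨hm t i v hget, hm⟩
    | none =>
      have hlen : nums.length ≤ i := by omega
      have hdrop : nums.drop i = [] := List.drop_eq_nil_of_le hlen
      have hne : ¬ ((nums.length : Int) - (i : Int) = 1 ∧ PySem.List.pyGet? nums (i : Int) = some t) := by
        intro ⟨h1, _⟩; omega
      have hle : t < 0 ∨ (nums.length : Int) - (i : Int) ≤ 1 := by right; omega
      rw [if_neg hne, dif_pos hle]
      have hA : combineIntsToTarget t (nums.drop i) = none := by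
        rw [pvA_eq, hdrop]
        rw [if_neg (by simp), dif_pos (by right; simp)]
      exact ⟨hA.symm, pvGood_insert hm t i none hA.symm⟩
  | succ d ih =>
    intro t i m hd hm
    rw [pvGoB]
    cases hget : m.get? (t, i) with
    | some v => exact ⟨hm t i v hget, hm⟩
    | none =>
      have hlen_drop : (nums.drop i).length = nums.length - i := List.length_drop ..
      by_cases h1 : (nums.length : Int) - (i : Int) = 1 ∧ PySem.List.pyGet? nums (i : Int) = some t
      · have h1' : (nums.drop i).length = 1 ∧ PySem.List.pyGet? (nums.drop i) 0 = some t :=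
          ⟨by omega, by rw [pvGet_drop]; exact h1.2⟩
        rw [if_pos h1]
        have hA : combineIntsToTarget t (nums.drop i) = some [] := by
          rw [pvA_eq, if_pos h1']
        exact ⟨hA.symm, pvGood_insert hm t i (some []) hA.symm⟩
      · have h1' : ¬ ((nums.drop i).length = 1 ∧ PySem.List.pyGet? (nums.drop i) 0 = some t) := by
          intro ⟨ha, hb⟩
          exact h1 ⟨by omega, by rw [← pvGet_drop]; exact hb⟩
        rw [if_neg h1]
        by_cases h2 : t < 0 ∨ (nums.length : Int) - (i : Int) ≤ 1
        · have h2' : t < 0 ∨ (nums.drop i).length ≤ 1 := by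
            rcases h2 with h | h
            · exact Or.inl h
            · exact Or.inr (by omega)
          rw [dif_pos h2]
          have hA : combineIntsToTarget t (nums.drop i) = none := by
            rw [pvA_eq, if_neg h1', dif_pos h2']
          exact ⟨hA.symm, pvGood_insert hm t i none hA.symm⟩
        · have h2' : ¬ (t < 0 ∨ (nums.drop i).length ≤ 1) := by
            intro h; rcases h with h | h
            · exact h2 (Or.inl h)
            · exact h2 (Or.inr (by omega))
          rw [dif_neg h2]
          have hi : i < nums.length := by omega
          have hcons : nums.drop i = nums[i] :: nums.drop (i + 1) :=
            List.drop_eq_getElem_cons hi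
          have hgetD : nums.getD i 0 = nums[i] := by
            rw [List.getD_eq_getElem?_getD, List.getElem?_eq_getElem hi]; rfl
          have hhead : (nums.drop i).headI = nums.getD i 0 := by
            rw [hcons, hgetD]; rfl
          have htail : (nums.drop i).tail = nums.drop (i + 1) := by
            rw [hcons, List.tail_cons]
          have hAval : combineIntsToTarget t (nums.drop i) =
              match combineIntsToTarget (t - nums.getD i 0) (nums.drop (i + 1)) with
              | some u => some u
              | none =>
                match combineIntsToTarget t (nums.drop (i + 1)) with
                | some r => some (nums.getD i 0 :: r)
                | none => none := by
            rw [pvA_eq, if_neg h1', dif_neg h2', hhead, htail]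
          obtain ⟨ih1a, ih1b⟩ := ih (t - nums.getD i 0) (i + 1) m (by omega) hm
          rcases hp1 : pvGoB nums (t - nums.getD i 0) (i + 1) m with ⟨r1, m1⟩
          rw [hp1] at ih1a ih1b
          cases r1 with
          | some u =>
            have hAeq : combineIntsToTarget (t - nums.getD i 0) (nums.drop (i + 1)) = some u :=
              ih1a.symm
            have hA : combineIntsToTarget t (nums.drop i) = some u := by
              rw [hAval, hAeq]
            exact ⟨hA.symm, pvGood_insert ih1b t i (some u) hA.symm⟩
          | none =>
            have hAeq : combineIntsToTarget (t - nums.getD i 0) (nums.drop (i + 1)) = none :=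
              ih1a.symm
            obtain ⟨ih2a, ih2b⟩ := ih t (i + 1) m1 (by omega) ih1b
            rcases hp2 : pvGoB nums t (i + 1) m1 with ⟨r2, m2⟩
            rw [hp2] at ih2a ih2b
            simp only [hp2]
            cases r2 with
            | some r =>
              have hBeq : combineIntsToTarget t (nums.drop (i + 1)) = some r := ih2a.symm
              have hA : combineIntsToTarget t (nums.drop i) = some (nums.getD i 0 :: r) := by
                rw [hAval, hAeq, hBeq]
              exact ⟨hA.symm, pvGood_insert ih2b t i _ hA.symm⟩
            | none =>
              have hBeq : combineIntsToTarget t (nums.drop (i + 1)) = none := ih2a.symm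
              have hA : combineIntsToTarget t (nums.drop i) = none := by
                rw [hAval, hAeq, hBeq]
              exact ⟨hA.symm, pvGood_insert ih2b t i none hA.symm⟩

-- ===== VERDICT (by name: the statement is the Claim_ definition above) =====
theorem combineIntsToTarget_spec : Claim_equal_combineIntsToTarget := by
  intro target nums _
  unfold Spec_combineIntsToTarget combineIntsToTarget_alt
  have hGood : pvGood nums PySem.Dict.empty := by
    intro t i v h; simp [PySem.Dict.get?_empty] at h
  have h := (pvGoB_correct nums nums.length target 0 PySem.Dict.empty (by omega) hGood).1
  rw [h]; simp
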